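-- pv_equiv track=rewrite | github.com/NNeuralDynamics/splaire | analysis/reporter_assays/analysis.py | _get_base_model
-- ===== SOURCE A (Python) =====
-- model_colors = {
--     "pangolin":          "#009E73",  # green
--     "pangolin_v2":       "#2CA02C",  # darker green (v2, human-finetuned)
--     "spliceai":          "#D55E00",  # orange-red
--     "splicetransformer": "#E69F00",  # yellow-orange
--     "sphaec_ref":        "#56B4E9",  # light blue
--     "sphaec_var":        "#0072B2",  # dark blue
--     "sphaec_avg":        "#CC79A7",  # pink
--     "gencode":           "#666666",  # gray (baseline)
-- }
--
-- def _get_base_model(key):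
--     """extract base model name from output key"""
--     key = key.lower().replace("-", "_").replace(" ", "_")
--     if key in model_colors:
--         return key
--     for base in sorted(model_colors.keys(), key=len, reverse=True):
--         if key.startswith(base):
--             return base
--     return None
-- ===== SOURCE B (Python) =====
-- model_colors = {
--     "pangolin":          "#009E73",
--     "pangolin_v2":       "#2CA02C",
--     "spliceai":          "#D55E00",
--     "splicetransformer": "#E69F00",
--     "sphaec_ref":        "#56B4E9",
--     "sphaec_var":        "#0072B2",
--     "sphaec_avg":        "#CC79A7",
--     "gencode":           "#666666",
-- }
--
-- def _get_base_model(key):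
--     """extract base model name from output key"""
--     key = key.lower().replace("-", "_").replace(" ", "_")
--     best = None
--     best_len = -1
--     for base in model_colors:
--         if len(base) > best_len and key.startswith(base):
--             best = base
--             best_len = len(base)
--     return best
-- ===== Notes on version B (the rewrite author's own statement) =====
-- stated objective: simpler
-- what changed: B drops A's exact-match fast path and the length-sort entirely: one pass over model_colors in insertion order keeps the longest matching prefix (best/best_len), which coincides with A's first match in the stable length-descending order.
import Mathlib
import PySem

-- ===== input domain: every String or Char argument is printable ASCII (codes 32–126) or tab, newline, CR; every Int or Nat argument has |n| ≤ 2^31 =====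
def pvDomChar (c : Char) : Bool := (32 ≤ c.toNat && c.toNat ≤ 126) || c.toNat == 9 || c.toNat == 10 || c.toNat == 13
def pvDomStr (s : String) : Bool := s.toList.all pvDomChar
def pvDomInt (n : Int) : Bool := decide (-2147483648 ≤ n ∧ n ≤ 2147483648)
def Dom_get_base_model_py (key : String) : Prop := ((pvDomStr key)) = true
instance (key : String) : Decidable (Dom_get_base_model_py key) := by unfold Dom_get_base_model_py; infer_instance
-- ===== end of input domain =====

-- B replaces A's exact-match fast path plus length-sorted first-prefix scan with a single
-- unsorted pass keeping the longest matching prefix; objective: simpler.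


-- ===== PORT A =====
def model_colors : PySem.Dict String String := PySem.Dict.ofList
  [("pangolin", "#009E73"), ("pangolin_v2", "#2CA02C"), ("spliceai", "#D55E00"),
   ("splicetransformer", "#E69F00"), ("sphaec_ref", "#56B4E9"), ("sphaec_var", "#0072B2"),
   ("sphaec_avg", "#CC79A7"), ("gencode", "#666666")]

-- the for-loop with early return: first base in the list that key starts with
def firstPrefixLoop (key : String) : List String → Option String
  | [] => none
  | base :: rest => if PySem.Str.startswith key base then some base else firstPrefixLoop key rest

def get_base_model_py (key : String) : Option String :=
  let key := PySem.Str.replace (PySem.Str.replace (PySem.Str.lower key) "-" "_") " " "_"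
  if model_colors.contains key then some key
  else firstPrefixLoop key (PySem.List.sorted model_colors.keys (fun s => PySem.Str.len s) true)

-- ===== PORT B =====
def get_base_model_py_alt (key : String) : Option String :=
  let key := PySem.Str.replace (PySem.Str.replace (PySem.Str.lower key) "-" "_") " " "_"
  (model_colors.keys.foldl
    (fun (acc : Option String × Int) base =>
      if PySem.Str.len base > acc.2 && PySem.Str.startswith key base
      then (some base, PySem.Str.len base) else acc)
    (none, -1)).1

-- ===== PRECONDITION & SPEC =====
def Spec_get_base_model_py (key : String) (out : Option String) : Prop := out = get_base_model_py_alt key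
instance (key : String) (out : Option String) : Decidable (Spec_get_base_model_py key out) := by unfold Spec_get_base_model_py; infer_instance

-- ===== CLAIM (what is proved, stated in full; the proofs are below) =====
def Claim_equal_get_base_model_py : Prop := ∀ (key : String), Dom_get_base_model_py key → Spec_get_base_model_py key (get_base_model_py key)

-- ===== LEMMAS AND PROOFS =====

theorem sorted_keys_eval :
    PySem.List.sorted model_colors.keys (fun s => PySem.Str.len s) true =
      ["splicetransformer", "pangolin_v2", "sphaec_ref", "sphaec_var", "sphaec_avg",
       "pangolin", "spliceai", "gencode"] := by decide

theorem keys_eval :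
    model_colors.keys = ["pangolin", "pangolin_v2", "spliceai", "splicetransformer",
      "sphaec_ref", "sphaec_var", "sphaec_avg", "gencode"] := by decide

theorem dict_eval : model_colors = PySem.Dict.mk
  [("pangolin", "#009E73"), ("pangolin_v2", "#2CA02C"), ("spliceai", "#D55E00"),
   ("splicetransformer", "#E69F00"), ("sphaec_ref", "#56B4E9"), ("sphaec_var", "#0072B2"),
   ("sphaec_avg", "#CC79A7"), ("gencode", "#666666")] := by decide

-- closed-form chains used only by the proof: A's loop / B's fold with the eight
-- prefix tests abstracted as booleans (sorted order for A, insertion order for B)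
def chainA (b4 b2 b5 b6 b7 b1 b3 b8 : Bool) : Option String :=
  if b4 then some "splicetransformer" else if b2 then some "pangolin_v2"
  else if b5 then some "sphaec_ref" else if b6 then some "sphaec_var"
  else if b7 then some "sphaec_avg" else if b1 then some "pangolin"
  else if b3 then some "spliceai" else if b8 then some "gencode" else none

def chainBStep (base : String) (b : Bool) (acc : Option String × Int) : Option String × Int :=
  if PySem.Str.len base > acc.2 && b then (some base, PySem.Str.len base) else acc

def chainB (b1 b2 b3 b4 b5 b6 b7 b8 : Bool) : Option String :=
  (chainBStep "gencode" b8 (chainBStep "sphaec_avg" b7 (chainBStep "sphaec_var" b6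
    (chainBStep "sphaec_ref" b5 (chainBStep "splicetransformer" b4 (chainBStep "spliceai" b3
      (chainBStep "pangolin_v2" b2 (chainBStep "pangolin" b1 (none, -1))))))))).1

theorem chain_eq : ∀ b1 b2 b3 b4 b5 b6 b7 b8 : Bool,
    chainA b4 b2 b5 b6 b7 b1 b3 b8 = chainB b1 b2 b3 b4 b5 b6 b7 b8 := by decide

theorem lhs_eq (k : String) :
    firstPrefixLoop k ["splicetransformer", "pangolin_v2", "sphaec_ref", "sphaec_var",
        "sphaec_avg", "pangolin", "spliceai", "gencode"] =
      chainA (PySem.Str.startswith k "splicetransformer") (PySem.Str.startswith k "pangolin_v2")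
        (PySem.Str.startswith k "sphaec_ref") (PySem.Str.startswith k "sphaec_var")
        (PySem.Str.startswith k "sphaec_avg") (PySem.Str.startswith k "pangolin")
        (PySem.Str.startswith k "spliceai") (PySem.Str.startswith k "gencode") := rfl

theorem step_eq (k : String) (acc : Option String × Int) (base : String) :
    (if PySem.Str.len base > acc.2 && PySem.Str.startswith k base
     then (some base, PySem.Str.len base) else acc) =
      chainBStep base (PySem.Str.startswith k base) acc := rfl

theorem step0_eq (k : String) (base : String) :
    (if PySem.Str.len base > (-1 : Int) && PySem.Str.startswith k base
     then (some base, PySem.Str.len base) else ((none : Option String), (-1 : Int))) =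
      chainBStep base (PySem.Str.startswith k base) (none, -1) := rfl

theorem rhs_eq (k : String) :
    (List.foldl
      (fun (acc : Option String × Int) base =>
        if PySem.Str.len base > acc.2 && PySem.Str.startswith k base
        then (some base, PySem.Str.len base) else acc)
      (none, -1)
      ["pangolin", "pangolin_v2", "spliceai", "splicetransformer", "sphaec_ref",
        "sphaec_var", "sphaec_avg", "gencode"]).1 =
      chainB (PySem.Str.startswith k "pangolin") (PySem.Str.startswith k "pangolin_v2")
        (PySem.Str.startswith k "spliceai") (PySem.Str.startswith k "splicetransformer")
        (PySem.Str.startswith k "sphaec_ref") (PySem.Str.startswith k "sphaec_var")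
        (PySem.Str.startswith k "sphaec_avg") (PySem.Str.startswith k "gencode") := by
  simp only [List.foldl, step_eq, step0_eq, chainB]
  rfl

-- core: for ANY (already-normalized) string k, A's body equals B's body
theorem core (k : String) :
    (if model_colors.contains k then some k
     else firstPrefixLoop k (PySem.List.sorted model_colors.keys (fun s => PySem.Str.len s) true)) =
    (model_colors.keys.foldl
      (fun (acc : Option String × Int) base =>
        if PySem.Str.len base > acc.2 && PySem.Str.startswith k base
        then (some base, PySem.Str.len base) else acc)
      (none, -1)).1 := by
  rw [sorted_keys_eval, keys_eval]
  by_cases h : model_colors.contains k = true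
  · -- exact-match branch: k is one of the 8 literal keys; both sides compute
    have hk : k = "pangolin" ∨ k = "pangolin_v2" ∨ k = "spliceai" ∨ k = "splicetransformer" ∨
        k = "sphaec_ref" ∨ k = "sphaec_var" ∨ k = "sphaec_avg" ∨ k = "gencode" := by
      rw [dict_eval] at h; simp at h; tauto
    simp only [h, if_true]
    rcases hk with h'|h'|h'|h'|h'|h'|h'|h' <;> subst h' <;> decide
  · rw [Bool.not_eq_true] at h
    simp only [h, Bool.false_eq_true, if_false]
    rw [lhs_eq, rhs_eq]
    exact chain_eq _ _ _ _ _ _ _ _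

-- ===== VERDICT (by name: the statement is the Claim_ definition above) =====
theorem get_base_model_py_spec : Claim_equal_get_base_model_py := by
  intro key _
  unfold Spec_get_base_model_py get_base_model_py get_base_model_py_alt
  exact core _
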